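-- pv_equiv track=rewrite | github.com/hyun06000/coding_test_study_with_python | 프로그래머스/level_check/LV3/110_옮기기.py | solution
-- ===== SOURCE A (Python) =====
-- def solution(s):
--
--     def extract(s):
--         count, stack = 0, []
--         for _s in s:
--             if _s == '0' and stack[-2:] == ['1', '1']:
--                 stack.pop();
--                 stack.pop();
--                 count += 1
--             else:
--                 stack.append(_s)
--         return ''.join(stack), count
--
--     def rearrange(s):
--         for i in range(-1, -len(s) - 1, -1):
--             pointer = len(s) + (i + 1)
--             if s[i] == '0':
--                 return s[:pointer] + '110' + s[pointer:]
--         return '110' + s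
--
--     answer = []
--     for _s in s:
--         _s, count = extract(_s)
--         for _ in range(count):
--             _s = rearrange(_s)
--         answer.append(_s)
--     return answer
-- ===== SOURCE B (Python) =====
-- def solution(s):
--     res = []
--     for t in s:
--         stack = []
--         count = 0
--         for ch in t:
--             if ch == '0' and len(stack) >= 2 and stack[-1] == '1' and stack[-2] == '1':
--                 del stack[-2:]
--                 count += 1
--             else:
--                 stack.append(ch)
--         r = ''.join(stack)
--         # insertion point: just after the last '0' (start if there is none)
--         p = r.rfind('0') + 1
--         res.append(r[:p] + '110' * count + r[p:])
--     return res
-- ===== Notes on version B (the rewrite author's own statement) =====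
-- stated objective: alternative
-- what changed: A re-scans and re-builds the reduced string once per removed '110' block (rearrange called count times, each a full right-to-left scan plus slicing); B does one stack pass, then locates the position after the last '0' once (rfind) and inserts '110'*count in a single concatenation.
import Mathlib
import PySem

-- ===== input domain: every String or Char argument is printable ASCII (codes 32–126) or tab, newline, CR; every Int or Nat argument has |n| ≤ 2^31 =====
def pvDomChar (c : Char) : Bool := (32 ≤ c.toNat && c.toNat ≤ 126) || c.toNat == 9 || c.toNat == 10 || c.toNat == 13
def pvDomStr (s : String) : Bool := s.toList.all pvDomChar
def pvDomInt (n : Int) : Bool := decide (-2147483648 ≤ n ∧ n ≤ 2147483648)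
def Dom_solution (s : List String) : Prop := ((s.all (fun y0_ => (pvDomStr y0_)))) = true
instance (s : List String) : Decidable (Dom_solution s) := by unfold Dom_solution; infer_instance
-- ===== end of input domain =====

-- B replaces A's count-many right-to-left rescans (one 'rearrange' call per removed block) by a
-- single search for the position after the last '0' and one insertion of '110'*count there.

-- ===== PORT A =====
-- extract: stack pass; stack[-2:] == ['1','1'] is PySem.List.slice; the two pop()s (values
-- ignored) are dropLast, exact here because the matched slice guarantees length ≥ 2.
def extractA (t : List Char) : List Char × Nat :=
  t.foldl
    (fun st c =>
      if c = '0' ∧ PySem.List.slice st.1 (some (-2)) none = ['1', '1'] then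
        (st.1.dropLast.dropLast, st.2 + 1)
      else (st.1 ++ [c], st.2))
    ([], 0)

-- rearrange: Python's 'for i in range(-1, -len(s)-1, -1)' as fuel recursion; i is the Python
-- index, pointer = len + (i+1); falling off the loop returns '110' + s.
def rearrangeAux (t : List Char) (fuel : Nat) (i : Int) : List Char :=
  match fuel with
  | 0 => '1' :: '1' :: '0' :: t
  | Nat.succ f =>
    if PySem.List.pyGet? t i = some '0' then
      PySem.List.slice t none (some ((t.length : Int) + (i + 1))) ++ ['1', '1', '0'] ++
        PySem.List.slice t (some ((t.length : Int) + (i + 1))) none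
    else rearrangeAux t f (i - 1)

def rearrangeA (t : List Char) : List Char := rearrangeAux t t.length (-1)

-- 'for _ in range(count): _s = rearrange(_s)'
def repeatRearrange (n : Nat) (t : List Char) : List Char :=
  match n with
  | 0 => t
  | Nat.succ m => repeatRearrange m (rearrangeA t)

def solution (s : List String) : List String :=
  s.map (fun t =>
    let rc := extractA t.toList
    String.ofList (repeatRearrange rc.2 rc.1))

-- ===== PORT B =====
-- one stack pass; explicit last-two test instead of a slice comparison
def reduceB (t : List Char) : List Char × Nat :=
  t.foldl
    (fun st c =>
      if c = '0' ∧ 2 ≤ st.1.length ∧ PySem.List.pyGet? st.1 (-1) = some '1' ∧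
          PySem.List.pyGet? st.1 (-2) = some '1' then
        (st.1.take (st.1.length - 2), st.2 + 1)
      else (st.1 ++ [c], st.2))
    ([], 0)

-- p = r.rfind('0') + 1: right-to-left scan for the last '0' (hand-ported; exact: findP r len
-- is 1 + the largest index holding '0', and 0 when '0' does not occur)
def findP (r : List Char) : Nat → Nat
  | 0 => 0
  | Nat.succ q => if r[q]? = some '0' then q + 1 else findP r q

def solution_alt (s : List String) : List String :=
  s.map (fun t =>
    let rc := reduceB t.toList
    let p := findP rc.1 rc.1.length
    String.ofList (rc.1.take p ++ (List.replicate rc.2 ['1', '1', '0']).flatten ++ rc.1.drop p))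

-- ===== PRECONDITION & SPEC =====
def Spec_solution (s : List String) (out : List String) : Prop := out = solution_alt s
instance (s : List String) (out : List String) : Decidable (Spec_solution s out) := by unfold Spec_solution; infer_instance

-- ===== CLAIM (what is proved, stated in full; the proofs are below) =====
def Claim_equal_solution : Prop := ∀ (s : List String), Dom_solution s → Spec_solution s (solution s)

-- ===== LEMMAS AND PROOFS =====

-- the two stack tests agree
lemma cond_iff (st : List Char) :
    (PySem.List.slice st (some (-2)) none = ['1', '1']) ↔
      (2 ≤ st.length ∧ PySem.List.pyGet? st (-1) = some '1' ∧
        PySem.List.pyGet? st (-2) = some '1') := by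
  rcases st.eq_nil_or_concat with rfl | ⟨w1, y, rfl⟩
  · simp [PySem.List.slice, PySem.List.pyGet?]
  rcases w1.eq_nil_or_concat with rfl | ⟨w, x, rfl⟩
  · simp [PySem.List.slice, PySem.List.pyGet?, PySem.List.clampIdx]
  · simp only [List.concat_eq_append, List.append_assoc, List.singleton_append]
    have hl : (w ++ [x, y]).length = w.length + 2 := by simp
    rw [PySem.List.slice_from_neg_ofNat _ 2 (by omega), hl]
    have hd : (w ++ [x, y]).drop (w.length + 2 - 2) = [x, y] := by simp
    rw [hd]
    have g1 : PySem.List.pyGet? (w ++ [x, y]) (-1) = some y := by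
      simp [PySem.List.pyGet?_neg_one, List.getLast?_append]
    have g2 : PySem.List.pyGet? (w ++ [x, y]) (-2) = some x := by
      rw [PySem.List.pyGet?_neg_ofNat _ 2 (by omega) (by simp), hl]
      simp
    rw [g1, g2]
    constructor
    · rintro h; simp at h; simp [h]
    · rintro ⟨-, h1, h2⟩; simp at h1 h2; simp [h1, h2]

lemma extract_eq (t : List Char) : extractA t = reduceB t := by
  have hf : (fun (st : List Char × Nat) c =>
      if c = '0' ∧ PySem.List.slice st.1 (some (-2)) none = ['1', '1'] then
        (st.1.dropLast.dropLast, st.2 + 1)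
      else (st.1 ++ [c], st.2)) =
    (fun (st : List Char × Nat) c =>
      if c = '0' ∧ 2 ≤ st.1.length ∧ PySem.List.pyGet? st.1 (-1) = some '1' ∧
          PySem.List.pyGet? st.1 (-2) = some '1' then
        (st.1.take (st.1.length - 2), st.2 + 1)
      else (st.1 ++ [c], st.2)) := by
    funext st c
    by_cases h : c = '0' ∧ PySem.List.slice st.1 (some (-2)) none = ['1', '1']
    · have h' := (and_congr_right fun _ => cond_iff st.1).1 h
      rw [if_pos h, if_pos h']
      simp [List.dropLast_eq_take, List.take_take]
      omega
    · have h' : ¬ (c = '0' ∧ 2 ≤ st.1.length ∧ PySem.List.pyGet? st.1 (-1) = some '1' ∧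
          PySem.List.pyGet? st.1 (-2) = some '1') :=
        fun hc => h ((and_congr_right fun _ => cond_iff st.1).2 hc)
      rw [if_neg h, if_neg h']
  unfold extractA reduceB
  rw [hf]

-- the simplified right-to-left scan: check index f-1, f-2, …
def scan (t : List Char) : Nat → List Char
  | 0 => '1' :: '1' :: '0' :: t
  | Nat.succ f =>
    if t[f]? = some '0' then t.take (f + 1) ++ ['1', '1', '0'] ++ t.drop (f + 1)
    else scan t f

lemma aux_eq_scan (t : List Char) :
    ∀ fuel, fuel ≤ t.length → rearrangeAux t fuel ((fuel : Int) - t.length - 1) = scan t fuel := by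
  intro fuel
  induction fuel with
  | zero => intro _; rfl
  | succ f ih =>
    intro hle
    have hf : f < t.length := by omega
    have hi : ((f + 1 : Nat) : Int) - t.length - 1 = -(((t.length - f : Nat) : Int)) := by
      push_cast [Nat.cast_sub hf.le]; ring
    have hget : PySem.List.pyGet? t (((f + 1 : Nat) : Int) - t.length - 1) = t[f]? := by
      have hx := PySem.List.pyGet?_neg_natCast (xs := t) (k := t.length - f) (by omega) (by omega)
      rw [hi, hx]; congr 1; omega
    have hptr : (t.length : Int) + ((((f + 1 : Nat) : Int) - t.length - 1) + 1) = ((f + 1 : Nat) : Int) := by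
      omega
    show rearrangeAux t (f + 1) _ = scan t (f + 1)
    rw [rearrangeAux, scan, hget, hptr, PySem.List.slice_to_natCast, PySem.List.slice_from_natCast]
    have hstep : (((f + 1 : Nat) : Int) - t.length - 1) - 1 = ((f : Nat) : Int) - t.length - 1 := by
      push_cast; ring
    rw [hstep, ih (by omega)]

lemma rearrangeA_eq_scan (t : List Char) : rearrangeA t = scan t t.length := by
  have h : ((t.length : Int) - t.length - 1) = -1 := by ring
  have := aux_eq_scan t t.length le_rfl
  rw [h] at this
  exact this

lemma scan_skip (t : List Char) (p : Nat)
    (h : ∀ j, p ≤ j → t[j]? ≠ some '0') :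
    ∀ m, p ≤ m → scan t m = scan t p := by
  intro m
  induction m with
  | zero => intro hm; have : p = 0 := by omega
            rw [this]
  | succ f ih =>
    intro hm
    by_cases hp : p = f + 1
    · rw [hp]
    · have hpf : p ≤ f := by omega
      rw [scan, if_neg (h f (by omega))]
      exact ih hpf

lemma rearrangeA_split (u v : List Char) (hv : ∀ c ∈ v, c ≠ '0')
    (hu : u = [] ∨ u.getLast? = some '0') :
    rearrangeA (u ++ v) = u ++ ['1', '1', '0'] ++ v := by
  have hns : ∀ j, u.length ≤ j → (u ++ v)[j]? ≠ some '0' := by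
    intro j hj hc
    rw [List.getElem?_append_right hj] at hc
    exact hv '0' (List.mem_of_getElem? hc) rfl
  have hlen : u.length ≤ (u ++ v).length := by simp
  rw [rearrangeA_eq_scan, scan_skip (u ++ v) u.length hns (u ++ v).length hlen]
  rcases hu with rfl | h0
  · simp [scan]
  · have hne : u ≠ [] := by rintro rfl; simp at h0
    obtain ⟨f, hfl⟩ : ∃ f, u.length = f + 1 :=
      ⟨u.length - 1, by have := List.length_pos_iff.2 hne; omega⟩
    have hget : (u ++ v)[f]? = some '0' := by
      have hg : u.getLast? = u[f]? := by rw [List.getLast?_eq_getElem?, hfl]; norm_num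
      rw [List.getElem?_append_left (by omega), ← hg]
      exact h0
    rw [hfl, scan, if_pos hget, ← hfl, List.take_left, List.drop_left]

lemma repeat_split (v : List Char) (hv : ∀ c ∈ v, c ≠ '0') :
    ∀ (c : Nat) (u : List Char), (u = [] ∨ u.getLast? = some '0') →
      repeatRearrange c (u ++ v) = u ++ (List.replicate c ['1', '1', '0']).flatten ++ v := by
  intro c
  induction c with
  | zero => intro u _; simp [repeatRearrange]
  | succ m ih =>
    intro u hu
    rw [repeatRearrange, rearrangeA_split u v hv hu]
    have : u ++ ['1', '1', '0'] ++ v = (u ++ ['1', '1', '0']) ++ v := by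
      simp [List.append_assoc]
    rw [this, ih (u ++ ['1', '1', '0']) (Or.inr (by simp))]
    simp [List.replicate_succ, List.append_assoc]

lemma findP_spec (r : List Char) :
    ∀ q, q ≤ r.length →
      findP r q ≤ q ∧ (findP r q = 0 ∨ r[findP r q - 1]? = some '0') ∧
        (∀ j, findP r q ≤ j → j < q → r[j]? ≠ some '0') := by
  intro q
  induction q with
  | zero => intro _; exact ⟨le_refl 0, Or.inl rfl, by omega⟩
  | succ f ih =>
    intro hle
    by_cases hc : r[f]? = some '0'
    · rw [findP, if_pos hc]
      exact ⟨le_refl _, Or.inr (by simpa using hc), by omega⟩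
    · rw [findP, if_neg hc]
      obtain ⟨h1, h2, h3⟩ := ih (by omega)
      refine ⟨by omega, h2, ?_⟩
      intro j hj hjf
      by_cases hjq : j < f
      · exact h3 j hj hjq
      · have : j = f := by omega
        rw [this]; exact hc

lemma assemble (r : List Char) (c p : Nat) (h1 : p ≤ r.length)
    (h2 : p = 0 ∨ r[p - 1]? = some '0')
    (h3 : ∀ j, p ≤ j → j < r.length → r[j]? ≠ some '0') :
    repeatRearrange c r =
      r.take p ++ (List.replicate c ['1', '1', '0']).flatten ++ r.drop p := by
  have hv : ∀ ch ∈ r.drop p, ch ≠ '0' := by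
    intro ch hch h0
    subst h0
    obtain ⟨i, hi, hival⟩ := List.getElem_of_mem hch
    have hsome : r[p + i]? = some '0' := by
      rw [← List.getElem?_drop, List.getElem?_eq_getElem hi, hival]
    have hilt : p + i < r.length := by simp at hi; omega
    exact h3 (p + i) (by omega) hilt hsome
  have hu : r.take p = [] ∨ (r.take p).getLast? = some '0' := by
    by_cases hp0 : p = 0
    · left; rw [hp0]; simp
    · right
      rcases h2 with h0 | hlast
      · exact absurd h0 hp0
      · have hlen : (r.take p).length = p := by simp; omega
        rw [List.getLast?_eq_getElem?, hlen, List.getElem?_take, if_pos (by omega)]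
        exact hlast
  calc repeatRearrange c r
      = repeatRearrange c (r.take p ++ r.drop p) := by rw [List.take_append_drop]
    _ = r.take p ++ (List.replicate c ['1', '1', '0']).flatten ++ r.drop p :=
        repeat_split (r.drop p) hv c (r.take p) hu

lemma per_string (t : List Char) :
    (let rc := extractA t
     repeatRearrange rc.2 rc.1) =
    (let rc := reduceB t
     let p := findP rc.1 rc.1.length
     rc.1.take p ++ (List.replicate rc.2 ['1', '1', '0']).flatten ++ rc.1.drop p) := by
  rw [← extract_eq]
  obtain ⟨h1, h2, h3⟩ := findP_spec (extractA t).1 (extractA t).1.length le_rfl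
  exact assemble (extractA t).1 (extractA t).2 _ h1 h2 h3

-- ===== VERDICT (by name: the statement is the Claim_ definition above) =====
theorem solution_spec : Claim_equal_solution := by
  intro s _
  unfold Spec_solution solution solution_alt
  refine List.map_congr_left (fun t _ => ?_)
  simp only [per_string t.toList]
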